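-- pv_equiv track=rewrite | github.com/KotvicCodes/Python_basics | LAL2/GJ-elimination.py | sortRows
-- ===== SOURCE A (Python) =====
-- def sortRows(matrixA, matrixB, dimensionOfA):
--     sortedMatrixA = []
--     sortedMatrixB = []
--     placeholderMatrixA = []
--     placeholderMatrixB = []
--     iterationMatrixA = [row[:] for row in matrixA]
--     iterationMatrixB = [row[:] for row in matrixB]
--
--     for j in range(dimensionOfA):
--         for k, rowA in enumerate(iterationMatrixA):
--             rowB = iterationMatrixB[k]
--
--             if rowA[j] != 0:
--                 sortedMatrixA.append(rowA)
--                 sortedMatrixB.append(rowB)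
--             else:
--                 placeholderMatrixA.append(rowA)
--                 placeholderMatrixB.append(rowB)
--
--         if j == dimensionOfA - 1:
--             sortedMatrixA.extend(placeholderMatrixA)
--             sortedMatrixB.extend(placeholderMatrixB)
--
--         iterationMatrixA = [row1[:] for row1 in placeholderMatrixA]
--         iterationMatrixB = [row1[:] for row1 in placeholderMatrixB]
--         placeholderMatrixA = []
--         placeholderMatrixB = []
--     return sortedMatrixA, sortedMatrixB
-- ===== SOURCE B (Python) =====
-- # One-pass counting sort: bucket each (rowA, rowB) pair by the first-nonzero
-- # column of rowA (early exit; zeros bucket last), then concatenate the buckets.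
-- def sortRows(matrixA, matrixB, dimensionOfA):
--     if dimensionOfA <= 0:
--         return [], []
--     buckets = [[] for _ in range(dimensionOfA + 1)]
--     for rowA, rowB in zip(matrixA, matrixB):
--         buckets[_firstNonzero(rowA, dimensionOfA)].append((rowA, rowB))
--     resultA = [p[0] for b in buckets for p in b]
--     resultB = [p[1] for b in buckets for p in b]
--     return resultA, resultB
--
-- def _firstNonzero(rowA, n):
--     j = 0
--     for v in rowA[:n]:
--         if v != 0:
--             return j
--         j += 1
--     return n
-- ===== Notes on version B (the rewrite author's own statement) =====
-- stated objective: faster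
-- what changed: A repeatedly re-partitions the surviving rows once per column (dimensionOfA passes over shrinking copies); B computes each row's first-nonzero-column key once with early exit and places the paired rows into per-key buckets in a single pass, concatenating the buckets (zeros bucket last).
import Mathlib
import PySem

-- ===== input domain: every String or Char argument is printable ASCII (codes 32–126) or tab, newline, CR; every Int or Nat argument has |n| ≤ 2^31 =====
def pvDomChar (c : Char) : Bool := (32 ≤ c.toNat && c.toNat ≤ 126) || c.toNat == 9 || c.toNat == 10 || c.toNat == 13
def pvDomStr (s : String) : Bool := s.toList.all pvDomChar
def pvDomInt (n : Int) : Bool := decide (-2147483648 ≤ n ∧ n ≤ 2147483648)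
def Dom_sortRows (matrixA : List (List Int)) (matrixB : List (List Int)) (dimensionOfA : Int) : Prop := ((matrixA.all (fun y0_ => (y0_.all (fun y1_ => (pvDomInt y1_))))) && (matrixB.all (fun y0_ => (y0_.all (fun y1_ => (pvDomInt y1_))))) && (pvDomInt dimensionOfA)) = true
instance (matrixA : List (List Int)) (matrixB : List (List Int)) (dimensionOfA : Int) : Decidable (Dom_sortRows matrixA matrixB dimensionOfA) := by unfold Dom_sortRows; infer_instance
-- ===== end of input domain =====

-- B replaces A's per-column re-partitioning passes by a single pass that buckets each
-- row pair under its first-nonzero-column key; return-value equivalence only (neither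
-- program mutates its arguments).

-- ===== PORT A =====
-- inner loop body: 'for k, rowA in enumerate(iterationMatrixA): …'
def innerStep (j : Int) (iB : List (List Int))
    (st : List (List Int) × List (List Int) × List (List Int) × List (List Int))
    (kr : Int × List Int) :
    List (List Int) × List (List Int) × List (List Int) × List (List Int) :=
  let rowB := PySem.List.pyGetD iB kr.1 []          -- iterationMatrixB[k]; in range under Pre_
  if PySem.List.pyGetD kr.2 j 0 ≠ 0 then            -- rowA[j] != 0; in range under Pre_
    (st.1 ++ [kr.2], st.2.1 ++ [rowB], st.2.2.1, st.2.2.2)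
  else
    (st.1, st.2.1, st.2.2.1 ++ [kr.2], st.2.2.2 ++ [rowB])

-- outer loop body: one iteration of 'for j in range(dimensionOfA)'
-- state: (sortedA, sortedB, placeholderA, placeholderB, iterationA, iterationB)
def outerStep (d : Int)
    (st : List (List Int) × List (List Int) × List (List Int) × List (List Int) × List (List Int) × List (List Int))
    (j : Int) :
    List (List Int) × List (List Int) × List (List Int) × List (List Int) × List (List Int) × List (List Int) :=
  let r := (PySem.List.enumerate st.2.2.2.2.1 0).foldl (innerStep j st.2.2.2.2.2)
            (st.1, st.2.1, st.2.2.1, st.2.2.2.1)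
  let sA := if j = d - 1 then r.1 ++ r.2.2.1 else r.1
  let sB := if j = d - 1 then r.2.1 ++ r.2.2.2 else r.2.1
  (sA, sB, [], [], r.2.2.1.map (fun row => row), r.2.2.2.map (fun row => row))

def sortRows (matrixA : List (List Int)) (matrixB : List (List Int)) (dimensionOfA : Int) : List (List Int) × List (List Int) :=
  let r := (PySem.List.pyRange 0 dimensionOfA 1).foldl (outerStep dimensionOfA)
      ([], [], [], [], matrixA.map (fun row => row), matrixB.map (fun row => row))
  (r.1, r.2.1)

-- ===== PORT B =====
-- _firstNonzero's loop over rowA[:n] with running index j and fallback n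
def firstNZLoop : List Int → Int → Int → Int
  | [], _, n => n
  | v :: t, j, n => if v ≠ 0 then j else firstNZLoop t (j + 1) n

-- 'buckets[_firstNonzero(rowA, n)].append((rowA, rowB))'
def bStep (n : Int) (bs : List (List (List Int × List Int))) (pr : List Int × List Int) :
    List (List (List Int × List Int)) :=
  bs.modify (firstNZLoop (PySem.List.slice pr.1 none (some n)) 0 n).toNat (fun b => b ++ [pr])

def sortRows_alt (matrixA : List (List Int)) (matrixB : List (List Int)) (dimensionOfA : Int) : List (List Int) × List (List Int) :=
  if dimensionOfA ≤ 0 then ([], [])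
  else
    let buckets0 := (PySem.List.pyRange 0 (dimensionOfA + 1) 1).map (fun _ => ([] : List (List Int × List Int)))
    let buckets := (matrixA.zip matrixB).foldl (bStep dimensionOfA) buckets0
    (buckets.flatMap (fun b => b.map (fun p => p.1)),
     buckets.flatMap (fun b => b.map (fun p => p.2)))

-- ===== PRECONDITION & SPEC =====
-- Pre_ excludes exactly the inputs where the Python A raises IndexError: for positive
-- dimensionOfA, a matrixB shorter than matrixA (iterationMatrixB[k]) or a row of matrixA
-- that is shorter than dimensionOfA and entirely zero (rowA[j] past the row's end).
def Pre_sortRows (matrixA : List (List Int)) (matrixB : List (List Int)) (dimensionOfA : Int) : Prop :=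
  0 < dimensionOfA →
    (matrixA.length ≤ matrixB.length ∧
     ∀ row ∈ matrixA, (row.length : Int) < dimensionOfA → ∃ x ∈ row, x ≠ 0)
instance (matrixA : List (List Int)) (matrixB : List (List Int)) (dimensionOfA : Int) : Decidable (Pre_sortRows matrixA matrixB dimensionOfA) := by unfold Pre_sortRows; infer_instance

def pvWitness_sortRows : List (List Int) × List (List Int) × Int := ([[1]], [[1]], 1)

def Spec_sortRows (matrixA : List (List Int)) (matrixB : List (List Int)) (dimensionOfA : Int) (out : List (List Int) × List (List Int)) : Prop := out = sortRows_alt matrixA matrixB dimensionOfA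
instance (matrixA : List (List Int)) (matrixB : List (List Int)) (dimensionOfA : Int) (out : List (List Int) × List (List Int)) : Decidable (Spec_sortRows matrixA matrixB dimensionOfA out) := by unfold Spec_sortRows; infer_instance

-- ===== CLAIM (what is proved, stated in full; the proofs are below) =====
def Claim_equal_sortRows : Prop := ∀ (matrixA : List (List Int)) (matrixB : List (List Int)) (dimensionOfA : Int), Dom_sortRows matrixA matrixB dimensionOfA → Pre_sortRows matrixA matrixB dimensionOfA → Spec_sortRows matrixA matrixB dimensionOfA (sortRows matrixA matrixB dimensionOfA)

-- ===== LEMMAS AND PROOFS =====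

-- the first-nonzero-column key, proof-side normal form (Nat-valued)
def keyN (n : Nat) (row : List Int) : Nat :=
  match (row.take n).findIdx? (fun v => v ≠ 0) with
  | some i => i
  | none => n

-- the port's branch condition as a Bool on a row pair
def nzb (j : Int) (p : List Int × List Int) : Bool := decide (PySem.List.pyGetD p.1 j 0 ≠ 0)

-- reference form of A's loop: per remaining column, the rows hit now, then the rest
def refA : Nat → Int → List (List Int × List Int) → List (List Int × List Int)
  | 0, _, _ => []
  | m + 1, j, P =>
      P.filter (fun p => nzb j p) ++
      (if m = 0 then P.filter (fun p => !nzb j p)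
       else refA m (j + 1) (P.filter (fun p => !nzb j p)))

theorem firstNZLoop_eq (l : List Int) : ∀ (j n : Int),
    firstNZLoop l j n = match l.findIdx? (fun v => v ≠ 0) with
                        | some i => j + (i : Int)
                        | none => n := by
  induction l with
  | nil => intro j n; simp [firstNZLoop]
  | cons v t ih =>
    intro j n
    by_cases hv : v ≠ 0
    · simp [firstNZLoop, hv, List.findIdx?_cons]
    · simp only [firstNZLoop, if_neg hv, List.findIdx?_cons, ne_eq, decide_not] at ih ⊢
      simp only [show (decide (v = 0)) = true by simpa using hv, Bool.not_true]
      rw [ih]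
      cases h : List.findIdx? (fun v => !decide (v = 0)) t with
      | none => simp [h]
      | some i => simp only [h, Option.map_some]; push_cast; ring

theorem firstNZ_key (row : List Int) (n : Int) (hn : 0 ≤ n) :
    firstNZLoop (PySem.List.slice row none (some n)) 0 n = ((keyN n.toNat row : Nat) : Int) := by
  rw [PySem.List.slice_to _ hn, firstNZLoop_eq, keyN]
  cases h : List.findIdx? (fun v => v ≠ 0) (row.take n.toNat) <;> simp
  omega

theorem keyN_le (n : Nat) (row : List Int) : keyN n row ≤ n := by
  unfold keyN
  cases h : List.findIdx? (fun v => v ≠ 0) (row.take n) with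
  | none => simp
  | some i =>
    have := (List.findIdx?_eq_some_iff_getElem.mp h).1
    simp only []
    have hl : (row.take n).length ≤ n := by simp
    omega

theorem keyN_zero_before (n : Nat) (row : List Int) :
    ∀ i : Nat, i < keyN n row → row.getD i 0 = 0 := by
  intro i hi
  unfold keyN at hi
  cases h : List.findIdx? (fun v => v ≠ 0) (row.take n) with
  | some k =>
    rw [h] at hi
    obtain ⟨hk, _, hmin⟩ := List.findIdx?_eq_some_iff_getElem.mp h
    have hi' : i < (row.take n).length := lt_trans hi hk
    have := hmin i hi
    have hlen : i < row.length := by simp at hi'; omega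
    rw [List.getD_eq_getElem _ _ hlen]
    have : (row.take n)[i] = row[i] := List.getElem_take
    simp_all
  | none =>
    rw [h] at hi
    have hi2 : i < n := hi
    have hall := List.findIdx?_eq_none_iff.mp h
    by_cases hlen : i < row.length
    · rw [List.getD_eq_getElem _ _ hlen]
      have hm : row[i] ∈ row.take n := by
        have : i < (row.take n).length := by simp; omega
        have : (row.take n)[i] ∈ row.take n := List.getElem_mem _
        simpa [List.getElem_take] using this
      simpa using hall _ hm
    · exact List.getD_eq_default _ _ (by omega)

theorem keyN_at (n : Nat) (row : List Int) (h : keyN n row < n) :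
    row.getD (keyN n row) 0 ≠ 0 := by
  cases hf : List.findIdx? (fun v => v ≠ 0) (row.take n) with
  | none =>
    have he : keyN n row = n := by unfold keyN; rw [hf]
    omega
  | some k =>
    have he : keyN n row = k := by unfold keyN; rw [hf]
    rw [he] at h ⊢
    obtain ⟨hk, hp, _⟩ := List.findIdx?_eq_some_iff_getElem.mp hf
    have hlen : k < row.length := by simp at hk; omega
    rw [List.getD_eq_getElem _ _ hlen]
    have : (row.take n)[k] = row[k] := List.getElem_take
    simp_all

theorem keyN_step (n : Nat) (row : List Int) (q : Nat) (hq : q < n) (hle : q ≤ keyN n row) :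
    (row.getD q 0 ≠ 0 ↔ keyN n row = q) := by
  constructor
  · intro hnz
    rcases Nat.lt_or_ge q (keyN n row) with hlt | hge
    · exact absurd (keyN_zero_before n row q hlt) hnz
    · omega
  · intro he; rw [← he] at hq ⊢; exact keyN_at n row hq

theorem pyGetD_append_len (pre : List (List Int)) (y : List Int) (ys : List (List Int)) :
    PySem.List.pyGetD (pre ++ y :: ys) (pre.length : Int) [] = y := by
  rw [PySem.List.pyGetD_natCast, List.getD_eq_getElem _ _ (by simp)]
  rw [List.getElem_append_right (by omega)]
  simp

theorem inner_spec (j : Int) : ∀ (iA iB pre sA sB pA pB : List (List Int)),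
    iA.length ≤ iB.length →
    (PySem.List.enumerate iA (pre.length : Int)).foldl (innerStep j (pre ++ iB)) (sA, sB, pA, pB)
    = (sA ++ ((iA.zip iB).filter (fun p => nzb j p)).map Prod.fst,
       sB ++ ((iA.zip iB).filter (fun p => nzb j p)).map Prod.snd,
       pA ++ ((iA.zip iB).filter (fun p => !nzb j p)).map Prod.fst,
       pB ++ ((iA.zip iB).filter (fun p => !nzb j p)).map Prod.snd) := by
  intro iA
  induction iA with
  | nil => intro iB pre sA sB pA pB h; simp [PySem.List.enumerate]
  | cons a iA ih =>
    intro iB pre sA sB pA pB h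
    cases iB with
    | nil => simp at h
    | cons b iB =>
      rw [PySem.List.enumerate_cons, List.foldl_cons]
      have hrowB : PySem.List.pyGetD (pre ++ b :: iB) (pre.length : Int) [] = b :=
        pyGetD_append_len pre b iB
      have hpre : ((pre.length : Int) + 1) = (((pre ++ [b]).length : Nat) : Int) := by
        simp
      have hlist : pre ++ b :: iB = (pre ++ [b]) ++ iB := by simp
      by_cases hc : PySem.List.pyGetD a j 0 ≠ 0
      · have hstep : innerStep j (pre ++ b :: iB) (sA, sB, pA, pB) ((pre.length : Int), a)
            = (sA ++ [a], sB ++ [b], pA, pB) := by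
          simp [innerStep, hrowB, hc]
        rw [hstep, hpre, hlist, ih iB (pre ++ [b]) _ _ _ _ (by simpa using h)]
        have hz : nzb j (a, b) = true := by simp [nzb, hc]
        simp [List.zip_cons_cons, List.filter_cons, hz]
      · have hstep : innerStep j (pre ++ b :: iB) (sA, sB, pA, pB) ((pre.length : Int), a)
            = (sA, sB, pA ++ [a], pB ++ [b]) := by
          simp [innerStep, hrowB, hc]
        rw [hstep, hpre, hlist, ih iB (pre ++ [b]) _ _ _ _ (by simpa using h)]
        have hz : nzb j (a, b) = false := by simp [nzb]; simpa using hc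
        simp [List.zip_cons_cons, List.filter_cons, hz]

theorem inner_spec0 (j : Int) (iA iB sA sB : List (List Int)) (h : iA.length ≤ iB.length) :
    (PySem.List.enumerate iA 0).foldl (innerStep j iB) (sA, sB, [], [])
    = (sA ++ ((iA.zip iB).filter (fun p => nzb j p)).map Prod.fst,
       sB ++ ((iA.zip iB).filter (fun p => nzb j p)).map Prod.snd,
       ((iA.zip iB).filter (fun p => !nzb j p)).map Prod.fst,
       ((iA.zip iB).filter (fun p => !nzb j p)).map Prod.snd) := by
  have := inner_spec j iA iB [] sA sB [] [] h
  simpa using this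

theorem outer_spec (d : Int) : ∀ (m : Nat) (j : Int) (iA iB sA sB : List (List Int)),
    iA.length ≤ iB.length → j + (m : Int) = d →
    ((PySem.List.pyRange j d 1).foldl (outerStep d) (sA, sB, [], [], iA, iB)).1
        = sA ++ (refA m j (iA.zip iB)).map Prod.fst
    ∧ ((PySem.List.pyRange j d 1).foldl (outerStep d) (sA, sB, [], [], iA, iB)).2.1
        = sB ++ (refA m j (iA.zip iB)).map Prod.snd := by
  intro m
  induction m with
  | zero =>
    intro j iA iB sA sB h hj
    rw [PySem.List.pyRange_one_eq_nil (by omega)]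
    simp [refA]
  | succ m ih =>
    intro j iA iB sA sB h hj
    rw [PySem.List.pyRange_one_cons (by omega), List.foldl_cons]
    set P := iA.zip iB with hP
    have hzip : ((P.filter (fun p => !nzb j p)).map Prod.fst).zip
        ((P.filter (fun p => !nzb j p)).map Prod.snd) = P.filter (fun p => !nzb j p) :=
      (List.zip_of_prod rfl rfl).symm
    have hstep : outerStep d (sA, sB, [], [], iA, iB) j
        = ((if j = d - 1
             then sA ++ (P.filter (fun p => nzb j p)).map Prod.fst
                     ++ (P.filter (fun p => !nzb j p)).map Prod.fst
             else sA ++ (P.filter (fun p => nzb j p)).map Prod.fst),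
           (if j = d - 1
             then sB ++ (P.filter (fun p => nzb j p)).map Prod.snd
                     ++ (P.filter (fun p => !nzb j p)).map Prod.snd
             else sB ++ (P.filter (fun p => nzb j p)).map Prod.snd),
           [], [],
           (P.filter (fun p => !nzb j p)).map Prod.fst,
           (P.filter (fun p => !nzb j p)).map Prod.snd) := by
      simp only [outerStep]
      rw [inner_spec0 j iA iB sA sB h]
      simp [List.map_id', hP]
    rw [hstep]
    by_cases hm : m = 0
    · subst hm
      have hj' : j = d - 1 := by omega
      rw [if_pos hj', if_pos hj', PySem.List.pyRange_one_eq_nil (by omega)]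
      simp only [List.foldl_nil]
      constructor
      · simp [refA, List.append_assoc]
      · simp [refA, List.append_assoc]
    · have hj' : j ≠ d - 1 := by omega
      rw [if_neg hj', if_neg hj']
      obtain ⟨h1, h2⟩ := ih (j + 1)
        ((P.filter (fun p => !nzb j p)).map Prod.fst)
        ((P.filter (fun p => !nzb j p)).map Prod.snd)
        (sA ++ (P.filter (fun p => nzb j p)).map Prod.fst)
        (sB ++ (P.filter (fun p => nzb j p)).map Prod.snd)
        (by simp) (by push_cast at hj ⊢; omega)
      rw [hzip] at h1 h2
      refine ⟨?_, ?_⟩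
      · rw [h1]
        have : refA (m + 1) j P
            = P.filter (fun p => nzb j p) ++ refA m (j + 1) (P.filter (fun p => !nzb j p)) := by
          simp [refA, hm]
        rw [this]
        simp [List.append_assoc]
      · rw [h2]
        have : refA (m + 1) j P
            = P.filter (fun p => nzb j p) ++ refA m (j + 1) (P.filter (fun p => !nzb j p)) := by
          simp [refA, hm]
        rw [this]
        simp [List.append_assoc]

theorem nzb_eq_key (n : Int) (j : Int) (p : List Int × List Int)
    (h0 : 0 ≤ j) (hjn : j < n) (hle : j ≤ ((keyN n.toNat p.1 : Nat) : Int)) :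
    nzb j p = decide (((keyN n.toNat p.1 : Nat) : Int) = j) := by
  have hj : j = ((j.toNat : Nat) : Int) := by omega
  rw [nzb, hj, PySem.List.pyGetD_natCast]
  have := keyN_step n.toNat p.1 j.toNat (by omega) (by omega)
  simp only [decide_eq_decide]
  rw [this]
  omega

theorem refA_eq (n : Int) (hn : 0 < n) : ∀ (m : Nat) (j : Int) (P : List (List Int × List Int)),
    0 ≤ j → j + (m : Int) = n → 1 ≤ m →
    (∀ p ∈ P, (j ≤ ((keyN n.toNat p.1 : Nat) : Int))) →
    refA m j P = (PySem.List.pyRange j (n + 1) 1).flatMap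
      (fun q => P.filter (fun p => decide (((keyN n.toNat p.1 : Nat) : Int) = q))) := by
  intro m
  induction m with
  | zero => intro j P _ _ habs; omega
  | succ m ih =>
    intro j P h0 hj _ hinv
    have hfilter : P.filter (fun p => nzb j p)
        = P.filter (fun p => decide (((keyN n.toNat p.1 : Nat) : Int) = j)) := by
      apply List.filter_congr
      intro p hp
      exact nzb_eq_key n j p h0 (by omega) (hinv p hp)
    by_cases hm : m = 0
    · subst hm
      have hj1 : j + 1 = n := by omega
      have hrange : PySem.List.pyRange j (n + 1) 1 = [j, n] := by
        rw [PySem.List.pyRange_one_cons (by omega), PySem.List.pyRange_one_cons (by omega),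
            PySem.List.pyRange_one_eq_nil (by omega)]
        simp [hj1]
      rw [hrange]
      have hzfilter : P.filter (fun p => !nzb j p)
          = P.filter (fun p => decide (((keyN n.toNat p.1 : Nat) : Int) = n)) := by
        apply List.filter_congr
        intro p hp
        have hk := keyN_le n.toNat p.1
        have hinvp := hinv p hp
        rw [nzb_eq_key n j p h0 (by omega) hinvp]
        have : (((keyN n.toNat p.1 : Nat) : Int) = n) ↔ ¬ (((keyN n.toNat p.1 : Nat) : Int) = j) := by
          omega
        simp [this]
      simp [refA, hfilter, hzfilter]
    · have hrange : PySem.List.pyRange j (n + 1) 1 = j :: PySem.List.pyRange (j + 1) (n + 1) 1 :=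
        PySem.List.pyRange_one_cons (by omega)
      have hrec := ih (j + 1) (P.filter (fun p => !nzb j p)) (by omega) (by push_cast at hj ⊢; omega) (by omega)
        (by
          intro p hp
          rw [List.mem_filter] at hp
          obtain ⟨hpP, hpz⟩ := hp
          have hinvp := hinv p hpP
          have := nzb_eq_key n j p h0 (by omega) hinvp
          rw [this] at hpz
          simp at hpz
          omega)
      have htail : (PySem.List.pyRange (j + 1) (n + 1) 1).flatMap
            (fun q => (P.filter (fun p => !nzb j p)).filter
              (fun p => decide (((keyN n.toNat p.1 : Nat) : Int) = q)))
          = (PySem.List.pyRange (j + 1) (n + 1) 1).flatMap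
            (fun q => P.filter (fun p => decide (((keyN n.toNat p.1 : Nat) : Int) = q))) := by
        apply List.flatMap_congr
        intro q hq
        rw [PySem.List.mem_pyRange_one] at hq
        rw [List.filter_filter]
        apply List.filter_congr
        intro p hp
        have hinvp := hinv p hp
        rw [nzb_eq_key n j p h0 (by omega) hinvp]
        by_cases hkq : ((keyN n.toNat p.1 : Nat) : Int) = q
        · simp [hkq]; omega
        · simp [hkq]
      rw [hrange]
      have : refA (m + 1) j P
          = P.filter (fun p => nzb j p) ++ refA m (j + 1) (P.filter (fun p => !nzb j p)) := by
        simp [refA, hm]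
      rw [this, hrec, htail, List.flatMap_cons, hfilter]

theorem bfold_len (n : Int) : ∀ (P : List (List Int × List Int)) (bs : List (List (List Int × List Int))),
    (P.foldl (bStep n) bs).length = bs.length := by
  intro P
  induction P with
  | nil => intro bs; rfl
  | cons p P ih => intro bs; rw [List.foldl_cons, ih]; simp [bStep]

theorem bfold_getD (n : Int) (hn : 0 ≤ n) :
    ∀ (P : List (List Int × List Int)) (bs : List (List (List Int × List Int))) (i : Nat),
      i < bs.length →
    (P.foldl (bStep n) bs).getD i []
      = bs.getD i [] ++ P.filter (fun p => decide (keyN n.toNat p.1 = i)) := by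
  intro P
  induction P with
  | nil => intro bs i hi; simp
  | cons p P ih =>
    intro bs i hi
    rw [List.foldl_cons]
    have hb : bStep n bs p = bs.modify (keyN n.toNat p.1) (fun b => b ++ [p]) := by
      rw [bStep, firstNZ_key p.1 n hn, Int.toNat_natCast]
    rw [hb, ih _ i (by simpa using hi)]
    have hmod : (bs.modify (keyN n.toNat p.1) (fun b => b ++ [p])).getD i []
        = if keyN n.toNat p.1 = i then bs.getD i [] ++ [p] else bs.getD i [] := by
      rw [List.getD_eq_getElem _ _ (by simpa using hi), List.getElem_modify,
          List.getD_eq_getElem _ _ hi]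
    rw [hmod]
    by_cases hk : keyN n.toNat p.1 = i
    · simp [hk, List.filter_cons, List.append_assoc]
    · simp [hk, List.filter_cons]

theorem bconcat (n : Int) (hn0 : 0 ≤ n) (P : List (List Int × List Int)) :
    P.foldl (bStep n) ((PySem.List.pyRange 0 (n + 1) 1).map (fun _ => []))
      = (List.range (n.toNat + 1)).map (fun q => P.filter (fun p => decide (keyN n.toNat p.1 = q))) := by
  have hb0len : ((PySem.List.pyRange 0 (n + 1) 1).map (fun _ => ([] : List (List Int × List Int)))).length = n.toNat + 1 := by
    simp [PySem.List.length_pyRange_one]; omega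
  apply List.ext_getElem
  · rw [bfold_len, hb0len]; simp
  · intro i h1 h2
    have hi : i < ((PySem.List.pyRange 0 (n + 1) 1).map (fun _ => ([] : List (List Int × List Int)))).length := by
      rw [bfold_len] at h1; exact h1
    rw [← List.getD_eq_getElem _ ([] : List (List Int × List Int)) h1,
        bfold_getD n hn0 P _ i hi,
        List.getD_eq_getElem _ _ hi]
    simp

theorem B_char (matrixA matrixB : List (List Int)) (dimensionOfA : Int) (hd : 0 < dimensionOfA) :
    sortRows_alt matrixA matrixB dimensionOfA =
      (((List.range (dimensionOfA.toNat + 1)).flatMap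
          (fun q => (matrixA.zip matrixB).filter
            (fun p => decide (keyN dimensionOfA.toNat p.1 = q)))).map Prod.fst,
       ((List.range (dimensionOfA.toNat + 1)).flatMap
          (fun q => (matrixA.zip matrixB).filter
            (fun p => decide (keyN dimensionOfA.toNat p.1 = q)))).map Prod.snd) := by
  simp only [sortRows_alt, if_neg (by omega : ¬ dimensionOfA ≤ 0)]
  rw [bconcat _ (by omega)]
  simp [List.flatMap_map, List.map_flatMap]

theorem B_nonpos (matrixA matrixB : List (List Int)) (dimensionOfA : Int) (h : dimensionOfA ≤ 0) :
    sortRows_alt matrixA matrixB dimensionOfA = ([], []) := by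
  simp [sortRows_alt, h]

theorem A_nonpos (matrixA matrixB : List (List Int)) (dimensionOfA : Int) (h : dimensionOfA ≤ 0) :
    sortRows matrixA matrixB dimensionOfA = ([], []) := by
  simp [sortRows, PySem.List.pyRange_one_eq_nil h]

theorem A_char (matrixA matrixB : List (List Int)) (dimensionOfA : Int)
    (hd : 0 < dimensionOfA) (hlen : matrixA.length ≤ matrixB.length) :
    sortRows matrixA matrixB dimensionOfA
      = ((refA dimensionOfA.toNat 0 (matrixA.zip matrixB)).map Prod.fst,
         (refA dimensionOfA.toNat 0 (matrixA.zip matrixB)).map Prod.snd) := by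
  simp only [sortRows]
  rw [List.map_id', List.map_id']
  obtain ⟨h1, h2⟩ := outer_spec dimensionOfA dimensionOfA.toNat 0 matrixA matrixB [] []
    hlen (by omega)
  rw [Prod.ext_iff]
  constructor
  · rw [h1]; simp
  · rw [h2]; simp

-- ===== VERDICT (by name: the statement is the Claim_ definition above) =====
theorem sortRows_spec : Claim_equal_sortRows := by
  unfold Claim_equal_sortRows
  intro matrixA matrixB dimensionOfA hDom hPre
  unfold Spec_sortRows
  by_cases hd : 0 < dimensionOfA
  · obtain ⟨hlen, _⟩ := hPre hd
    rw [A_char matrixA matrixB dimensionOfA hd hlen, B_char matrixA matrixB dimensionOfA hd]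
    rw [refA_eq dimensionOfA hd dimensionOfA.toNat 0 (matrixA.zip matrixB)
        le_rfl (by omega) (by omega) (fun p _ => by positivity)]
    rw [show (dimensionOfA : Int) + 1 = ((dimensionOfA.toNat + 1 : Nat) : Int) by omega,
        PySem.List.pyRange_zero_natCast, List.flatMap_map]
    have hfun : ∀ q : Nat, (matrixA.zip matrixB).filter
          (fun p => decide (((keyN dimensionOfA.toNat p.1 : Nat) : Int) = ((q : Nat) : Int)))
        = (matrixA.zip matrixB).filter
          (fun p => decide (keyN dimensionOfA.toNat p.1 = q)) := by
      intro q
      apply List.filter_congr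
      intro p _
      simp
    rw [Prod.ext_iff]
    constructor <;> · simp only []; rw [List.flatMap_congr (fun q _ => hfun q)]
  · rw [A_nonpos matrixA matrixB dimensionOfA (by omega),
        B_nonpos matrixA matrixB dimensionOfA (by omega)]
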